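-- pv_equiv track=rewrite | github.com/kszhao552/CS111 | problemSets/problemSet7/ps7image/ps7pr5.py | fold_diag
-- ===== SOURCE A (Python) =====
-- def create_uniform_image(height, width, pixel):
--     """ creates and returns a 2-D list of pixels with height rows and
--         width columns in which all of the pixels have the RGB values
--         given by pixel
--         inputs: height and width are non-negative integers
--                 pixel is a 1-D list of RBG values of the form [R,G,B],
--                      where each element is an integer between 0 and 255.
--     """
--     pixels = []
--
--     for r in range(height):
--         row = [pixel] * width
--         pixels += [row]
--
--     return pixels
--
-- def blank_image(height, width):
--     """ creates and returns a 2-D list of pixels with height rows and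
--         width columns in which all of the pixels are green.
--         inputs: height and width are non-negative integers
--     """
--     all_green = create_uniform_image(height, width, [0, 255, 0])
--     return all_green
--
-- def fold_diag(pixels):
--     """takes a 2d list of pixels and folds it diagnolly
--     input: a 2d list of pixels"""
--     grid = blank_image(len(pixels), len(pixels[0]))
--
--     for r in range(len(pixels)):
--         for c in range(len(pixels[0])):
--             if r >c:
--                 grid[r][c] = [255,255,255]
--             else:
--                 grid[r][c] = pixels[r][c]
--
--     return grid
-- ===== SOURCE B (Python) =====
-- def fold_diag(pixels):
--     """takes a 2d list of pixels and folds it diagnolly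
--     input: a 2d list of pixels"""
--     w = len(pixels[0])
--     return [[[255, 255, 255] for _ in range(min(r, w))] + row[r:w]
--             for r, row in enumerate(pixels)]
-- ===== Notes on version B (the rewrite author's own statement) =====
-- stated objective: simpler
-- what changed: Instead of allocating a green blank grid and overwriting every cell via a nested per-cell r>c test, B builds each row directly in one pass over rows as a white prefix of length min(r,w) concatenated with the slice pixels[r][r:w].
-- outside the precondition, e.g. on fold_diag([]): A raises IndexError, B raises IndexError
import Mathlib
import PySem

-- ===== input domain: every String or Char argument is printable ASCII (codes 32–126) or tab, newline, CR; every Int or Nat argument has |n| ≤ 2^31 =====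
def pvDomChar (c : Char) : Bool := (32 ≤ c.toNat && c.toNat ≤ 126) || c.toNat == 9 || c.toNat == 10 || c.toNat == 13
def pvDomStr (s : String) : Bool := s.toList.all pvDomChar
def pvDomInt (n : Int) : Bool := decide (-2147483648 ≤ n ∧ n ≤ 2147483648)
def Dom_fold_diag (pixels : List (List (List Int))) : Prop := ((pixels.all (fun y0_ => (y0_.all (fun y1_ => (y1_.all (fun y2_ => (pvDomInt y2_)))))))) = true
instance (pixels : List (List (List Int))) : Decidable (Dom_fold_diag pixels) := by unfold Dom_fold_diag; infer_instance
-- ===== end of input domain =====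

-- B replaces A's blank-grid-then-overwrite-every-cell nested loops by building each row
-- directly (white prefix ++ slice); objective: simpler.  Equivalence is about the return value.

-- ===== PORT A =====
-- [pixel] * width : Python list repetition (negative count gives []); Int.toNat clamps the same way.
def create_uniform_image (height width : Int) (pixel : List Int) : List (List (List Int)) :=
  (PySem.List.pyRange 0 height 1).foldl (fun pixels _ => pixels ++ [List.replicate width.toNat pixel]) []

def blank_image (height width : Int) : List (List (List Int)) :=
  create_uniform_image height width [0, 255, 0]

-- grid[r][c] = v mutation ported as grid.set r ((grid.getD r []).set c v); pixels[r][c] read as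
-- getD (indices are in range on every input Pre_ admits; on [] Python raises IndexError at len(pixels[0])).
def fold_diag (pixels : List (List (List Int))) : List (List (List Int)) :=
  let grid := blank_image (pixels.length : Int) ((pixels.headD []).length : Int)
  (List.range pixels.length).foldl (fun grid r =>
    (List.range (pixels.headD []).length).foldl (fun grid c =>
      if r > c then
        grid.set r ((grid.getD r []).set c [255, 255, 255])
      else
        grid.set r ((grid.getD r []).set c ((pixels.getD r []).getD c []))) grid) grid

-- ===== PORT B =====
-- enumerate(pixels) ported as zipIdx (indices are the naturals 0..n-1); row[r:w] via PySem slice.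
def fold_diag_alt (pixels : List (List (List Int))) : List (List (List Int)) :=
  let w := (pixels.headD []).length
  pixels.zipIdx.map (fun p =>
    List.replicate (min p.2 w) [255, 255, 255] ++ PySem.List.slice p.1 (some (p.2 : Int)) (some (w : Int)))

-- ===== PRECONDITION & SPEC =====
-- A raises IndexError on [] (len(pixels[0])) and when a row r < w is shorter than w = len(pixels[0])
-- (reading pixels[r][c] for c up to w-1); exactly those inputs are excluded.
def Pre_fold_diag (pixels : List (List (List Int))) : Prop :=
  pixels ≠ [] ∧ ∀ r < pixels.length, r < (pixels.headD []).length →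
    (pixels.headD []).length ≤ (pixels.getD r []).length
instance (pixels : List (List (List Int))) : Decidable (Pre_fold_diag pixels) := by
  unfold Pre_fold_diag; infer_instance

def pvWitness_fold_diag : List (List (List Int)) :=
  [[[1, 2, 3], [4, 5, 6]], [[7, 8, 9], [10, 11, 12]]]

def Spec_fold_diag (pixels : List (List (List Int))) (out : List (List (List Int))) : Prop := out = fold_diag_alt pixels
instance (pixels : List (List (List Int))) (out : List (List (List Int))) : Decidable (Spec_fold_diag pixels out) := by unfold Spec_fold_diag; infer_instance

-- ===== CLAIM (what is proved, stated in full; the proofs are below) =====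
def Claim_equal_fold_diag : Prop := ∀ (pixels : List (List (List Int))), Dom_fold_diag pixels → Pre_fold_diag pixels → Spec_fold_diag pixels (fold_diag pixels)

-- ===== LEMMAS AND PROOFS =====

-- appending one row per loop iteration is a replicate
theorem append_fold (l : List Int) (acc : List (List (List Int))) (row : List (List Int)) :
    l.foldl (fun ps _ => ps ++ [row]) acc = acc ++ List.replicate l.length row := by
  induction l generalizing acc with
  | nil => simp
  | cons x l ih => simp [ih, List.replicate_succ]

-- the blank grid is a replicate of replicates
theorem blank_eq (n w : ℕ) :
    blank_image (n : Int) (w : Int) = List.replicate n (List.replicate w [0, 255, 0]) := by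
  unfold blank_image create_uniform_image
  rw [append_fold]
  simp [PySem.List.length_pyRange_one]

-- the inner cell loop lifted to a single row operation
theorem inner_lift (l : List ℕ) (g : List (List (List Int))) (r : ℕ) (v : ℕ → List Int)
    (hr : r < g.length) :
    l.foldl (fun g c => g.set r ((g.getD r []).set c (v c))) g
      = g.set r (l.foldl (fun row c => row.set c (v c)) (g.getD r [])) := by
  induction l generalizing g with
  | nil =>
      simp only [List.foldl_nil]
      rw [List.getD_eq_getElem _ _ hr, List.set_getElem_self]
  | cons c l ih =>
      simp only [List.foldl_cons]
      rw [ih _ (by simpa using hr)]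
      have hgd : ∀ X : List (List Int), (g.set r X).getD r [] = X := by
        intro X
        rw [List.getD_eq_getElem _ _ (by simpa using hr)]
        simp
      rw [hgd, List.set_set]

-- each outer-loop step preserves the grid's length
theorem foldl_set_length (l : List ℕ) (g0 : List (List (List Int)))
    (F : ℕ → List (List Int) → List (List Int)) :
    (l.foldl (fun g r => g.set r (F r (g.getD r []))) g0).length = g0.length := by
  induction l generalizing g0 with
  | nil => rfl
  | cons r l ih => rw [List.foldl_cons, ih]; simp

-- lift inner_lift through the whole outer loop
theorem outer_full (k w : ℕ) (g0 : List (List (List Int))) (v : ℕ → ℕ → List Int)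
    (hk : k ≤ g0.length) :
    (List.range k).foldl
        (fun g r => (List.range w).foldl (fun g c => g.set r ((g.getD r []).set c (v r c))) g) g0
      = (List.range k).foldl
          (fun g r => g.set r ((List.range w).foldl (fun row c => row.set c (v r c)) (g.getD r []))) g0 := by
  induction k with
  | zero => rfl
  | succ k ih =>
      rw [List.range_succ, List.foldl_append, List.foldl_append, ih (by omega)]
      simp only [List.foldl_cons, List.foldl_nil]
      rw [inner_lift _ _ _ _ (by
        rw [foldl_set_length _ _
          (fun r row => (List.range w).foldl (fun row c => row.set c (v r c)) row)]
        omega)]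

-- outer loop: each row r is replaced by F r applied to the original row r
theorem outer_map (k : ℕ) (g0 : List (List (List Int))) (F : ℕ → List (List Int) → List (List Int))
    (hk : k ≤ g0.length) :
    (List.range k).foldl (fun g r => g.set r (F r (g.getD r []))) g0
      = g0.zipIdx.map (fun p => if p.2 < k then F p.2 p.1 else p.1) := by
  induction k with
  | zero => simp
  | succ k ih =>
      rw [List.range_succ, List.foldl_append, ih (by omega)]
      simp only [List.foldl_cons, List.foldl_nil]
      have hlen : (g0.zipIdx.map (fun p => if p.2 < k then F p.2 p.1 else p.1)).length = g0.length := by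
        simp
      have hget : (g0.zipIdx.map (fun p => if p.2 < k then F p.2 p.1 else p.1)).getD k []
          = g0[k]'(by omega) := by
        rw [List.getD_eq_getElem _ _ (by omega)]
        simp
      rw [hget]
      apply List.ext_getElem (by simp [hlen])
      intro i hi1 hi2
      rw [List.getElem_set]
      simp only [List.getElem_map, List.getElem_zipIdx] at *
      split_ifs with h1 h2 h3 h3 <;> simp_all <;> omega

-- filling all indices of a row
theorem row_fill (w : ℕ) (row0 : List (List Int)) (v : ℕ → List Int) (hw : w ≤ row0.length) :
    (List.range w).foldl (fun row c => row.set c (v c)) row0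
      = (List.range w).map v ++ row0.drop w := by
  induction w with
  | zero => simp
  | succ w ih =>
      rw [List.range_succ, List.foldl_append, ih (by omega)]
      simp only [List.foldl_cons, List.foldl_nil, List.map_append, List.map_cons, List.map_nil]
      rw [List.set_append_right _ _ (by simp)]
      simp only [List.length_map, List.length_range, Nat.sub_self]
      rw [show List.drop w row0 = row0[w]'(by omega) :: List.drop (w + 1) row0 from
        List.drop_eq_getElem_cons (by omega)]
      rw [List.set_cons_zero]
      simp

-- one row of B equals the row A's loops produce
theorem row_eq (r w : ℕ) (row : List (List Int)) (hw : w ≤ row.length) :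
    (List.range w).map (fun c => if r > c then [255, 255, 255] else row.getD c [])
      = List.replicate (min r w) [255, 255, 255]
        ++ PySem.List.slice row (some (r : Int)) (some (w : Int)) := by
  rw [PySem.List.slice_natCast]
  apply List.ext_getElem
  · simp; omega
  · intro i hi1 hi2
    simp only [List.getElem_map, List.getElem_range]
    simp only [List.length_map, List.length_range] at hi1
    by_cases h : i < min r w
    · rw [List.getElem_append_left (by simp; omega)]
      rw [List.getElem_replicate, if_pos (by omega)]
    · rw [List.getElem_append_right (by simp; omega)]
      rw [if_neg (by omega)]
      simp only [List.length_replicate, List.getElem_take, List.getElem_drop]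
      rw [List.getD_eq_getElem _ _ (by omega)]
      rw [getElem_congr_idx (show r + (i - min r w) = i by omega)]

-- ===== VERDICT (by name: the statement is the Claim_ definition above) =====
theorem fold_diag_spec : Claim_equal_fold_diag := by
  intro pixels _ hpre
  obtain ⟨hne, hrow⟩ := hpre
  unfold Spec_fold_diag
  simp only [fold_diag, fold_diag_alt]
  have hbody : ∀ (g : List (List (List Int))) (r c : ℕ),
      (if r > c then g.set r ((g.getD r []).set c [255, 255, 255])
       else g.set r ((g.getD r []).set c ((pixels.getD r []).getD c [])))
      = g.set r ((g.getD r []).set c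
          (if r > c then [255, 255, 255] else (pixels.getD r []).getD c [])) := by
    intro g r c; split_ifs <;> rfl
  simp only [hbody]
  rw [outer_full _ _ _ _ (by rw [blank_eq]; simp)]
  rw [outer_map pixels.length
        (blank_image (pixels.length : Int) ((pixels.headD []).length : Int))
        (fun r row => (List.range (pixels.headD []).length).foldl
          (fun row c => row.set c
            (if r > c then [255, 255, 255] else (pixels.getD r []).getD c [])) row)
        (by rw [blank_eq]; simp)]
  rw [blank_eq]
  apply List.ext_getElem (by simp)
  intro r h1 h2
  simp only [List.length_map, List.length_zipIdx, List.length_replicate] at h1 h2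
  simp only [List.getElem_map, List.getElem_zipIdx, List.getElem_replicate, Nat.zero_add]
  rw [if_pos h2]
  rw [row_fill _ _ _ (by simp)]
  rw [List.drop_replicate]
  simp only [Nat.sub_self, List.replicate_zero, List.append_nil]
  have hgetd : pixels.getD r [] = pixels[r] := List.getD_eq_getElem _ _ h2
  by_cases hc : r < (pixels.headD []).length
  · rw [← row_eq r _ pixels[r] (by rw [← hgetd]; exact hrow r h2 hc)]
    simp only [hgetd]
  · rw [PySem.List.slice_natCast]
    rw [show (pixels.headD []).length - r = 0 by omega, List.take_zero, List.append_nil]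
    rw [show min r (pixels.headD []).length = (pixels.headD []).length by omega]
    apply List.ext_getElem (by simp)
    intro c hc1 hc2
    simp only [List.length_map, List.length_range] at hc1
    simp only [List.getElem_map, List.getElem_range, List.getElem_replicate]
    rw [if_pos (by omega)]
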